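-- pv_equiv track=rewrite | github.com/GABallena/Hunting | Genomic Data Science/exam.py | naive_exact_matching
-- ===== SOURCE A (Python) =====
-- def naive_exact_matching(text, pattern):
--     n = len(text)
--     m = len(pattern)
--     alignments = 0
--     comparisons = 0
--
--     for i in range(n - m + 1):  # for each possible alignment
--         alignments += 1
--         for j in range(m):  # compare the pattern to the substring
--             comparisons += 1
--             if text[i + j] != pattern[j]:
--                 break
--     return alignments, comparisons
-- ===== SOURCE B (Python) =====
-- def lcp(a, b):
--     # length of the common prefix of a and b
--     l = 0
--     for x, y in zip(a, b):
--         if x != y: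
--             return l
--         l += 1
--     return l
--
--
-- def naive_exact_matching(text, pattern):
--     n = len(text)
--     m = len(pattern)
--     k = max(n - m + 1, 0)
--     counts = [min(lcp(text[i:i + m], pattern) + 1, m) for i in range(k)]
--     return (k, sum(counts))
-- ===== Notes on version B (the rewrite author's own statement) =====
-- stated objective: simpler
-- what changed: mutable alignment/comparison counters with a nested break-loop are replaced by a closed-form alignment count max(n-m+1,0) and a sum of min(commonPrefixLen+1, m) over all alignments
import Mathlib
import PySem

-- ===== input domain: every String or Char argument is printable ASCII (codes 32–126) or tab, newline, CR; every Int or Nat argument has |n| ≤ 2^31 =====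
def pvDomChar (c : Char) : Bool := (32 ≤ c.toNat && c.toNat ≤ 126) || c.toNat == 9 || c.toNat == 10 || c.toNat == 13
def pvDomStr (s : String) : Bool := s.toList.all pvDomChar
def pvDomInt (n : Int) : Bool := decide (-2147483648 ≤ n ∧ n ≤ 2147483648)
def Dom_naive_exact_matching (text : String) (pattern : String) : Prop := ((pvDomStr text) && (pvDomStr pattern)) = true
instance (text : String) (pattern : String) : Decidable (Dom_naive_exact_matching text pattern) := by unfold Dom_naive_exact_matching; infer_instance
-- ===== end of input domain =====

-- B replaces A's mutable counters and nested break-loop by a closed-form alignment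
-- count and a sum of per-alignment common-prefix lengths (objective: simpler).

-- ===== PORT A =====
-- inner 'for j in range(m): comparisons += 1; if text[i+j] != pattern[j]: break'
-- (indices i+j and j are always in range when A runs it, so pyGetD's default is never used)
def pvAInner (t p : List Char) (i : Int) : List Int → Int
  | [] => 0
  | j :: rest =>
      if PySem.List.pyGetD t (i + j) ' ' ≠ PySem.List.pyGetD p j ' ' then 1
      else 1 + pvAInner t p i rest

def naive_exact_matching (text : String) (pattern : String) : List Int :=
  let t := text.toList
  let p := pattern.toList
  let n : Int := t.length
  let m : Int := p.length
  let res := (PySem.List.pyRange 0 (n - m + 1) 1).foldl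
    (fun (st : Int × Int) i => (st.1 + 1, st.2 + pvAInner t p i (PySem.List.pyRange 0 m 1)))
    (0, 0)
  [res.1, res.2]

-- ===== PORT B =====
-- Source B's lcp: 'for x, y in zip(a, b): if x != y: return l; l += 1'
def pvLcp : List (Char × Char) → Int
  | [] => 0
  | (x, y) :: rest => if x ≠ y then 0 else 1 + pvLcp rest

def naive_exact_matching_alt (text : String) (pattern : String) : List Int :=
  let t := text.toList
  let p := pattern.toList
  let n : Int := t.length
  let m : Int := p.length
  let k : Int := max (n - m + 1) 0
  let counts := (PySem.List.pyRange 0 k 1).map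
    (fun i => min (pvLcp ((PySem.List.slice t (some i) (some (i + m))).zip p) + 1) m)
  [k, counts.sum]

-- ===== PRECONDITION & SPEC =====
def Spec_naive_exact_matching (text : String) (pattern : String) (out : List Int) : Prop := out = naive_exact_matching_alt text pattern
instance (text : String) (pattern : String) (out : List Int) : Decidable (Spec_naive_exact_matching text pattern out) := by unfold Spec_naive_exact_matching; infer_instance

-- ===== CLAIM (what is proved, stated in full; the proofs are below) =====
def Claim_equal_naive_exact_matching : Prop := ∀ (text : String) (pattern : String), Dom_naive_exact_matching text pattern → Spec_naive_exact_matching text pattern (naive_exact_matching text pattern)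

-- ===== LEMMAS AND PROOFS =====

theorem pvLcp_nonneg (l : List (Char × Char)) : 0 ≤ pvLcp l := by
  induction l with
  | nil => simp [pvLcp]
  | cons xy r ih =>
      obtain ⟨x, y⟩ := xy
      simp only [pvLcp]
      split_ifs <;> omega

-- A's fold computes (length of the range, sum of the inner counts).
theorem pv_foldA (g : Int → Int) : ∀ (L : List Int) (a c : Int),
    L.foldl (fun (st : Int × Int) i => (st.1 + 1, st.2 + g i)) (a, c)
      = (a + L.length, c + (L.map g).sum) := by
  intro L
  induction L with
  | nil => intro a c; simp
  | cons x xs ih =>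
      intro a c
      simp [List.foldl_cons, ih]
      constructor <;> ring

theorem pv_zip_take_left {α β : Type} : ∀ (a : List α) (b : List β) (n : Nat),
    b.length ≤ n → (a.take n).zip b = a.zip b := by
  intro a
  induction a with
  | nil => simp
  | cons x xs ih =>
      intro b n hb
      cases b with
      | nil => simp
      | cons y ys =>
          cases n with
          | zero => simp at hb
          | succ n => simp [List.zip_cons_cons, ih ys n (by simpa using hb)]

-- A's inner loop over j ∈ range(j₀, j₀+kk) equals min(lcp+1, kk) on the remaining suffixes.
theorem pv_inner_eq : ∀ (kk : Nat) (t p : List Char) (i j : Int),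
    0 ≤ i → 0 ≤ j → i + j + kk ≤ t.length → j + kk ≤ p.length →
    pvAInner t p i (PySem.List.pyRange j (j + kk) 1)
      = min (pvLcp ((t.drop (i + j).toNat).zip (p.drop j.toNat)) + 1) kk := by
  intro kk
  induction kk with
  | zero =>
      intro t p i j _ _ _ _
      rw [show (j + (0:Nat) : Int) = j by push_cast; ring,
          PySem.List.pyRange_one_eq_nil (le_refl j)]
      have h := pvLcp_nonneg ((t.drop (i + j).toNat).zip (p.drop j.toNat))
      simp only [pvAInner]
      omega
  | succ kk ih =>
      intro t p i j hi hj ht hp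
      have hjb : j < j + (kk + 1 : Nat) := by push_cast; omega
      rw [PySem.List.pyRange_one_cons hjb]
      have hit : (i + j).toNat < t.length := by omega
      have hjp : j.toNat < p.length := by omega
      have hdt : t.drop (i + j).toNat = t[(i + j).toNat] :: t.drop ((i + j).toNat + 1) :=
        List.drop_eq_getElem_cons hit
      have hdp : p.drop j.toNat = p[j.toNat] :: p.drop (j.toNat + 1) :=
        List.drop_eq_getElem_cons hjp
      show (if PySem.List.pyGetD t (i + j) ' ' ≠ PySem.List.pyGetD p j ' ' then 1
            else 1 + pvAInner t p i (PySem.List.pyRange (j + 1) (j + (kk + 1 : Nat)) 1)) = _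
      rw [PySem.List.pyGetD_eq_getElem t ' ' (by omega) (by omega),
          PySem.List.pyGetD_eq_getElem p ' ' (by omega) (by omega),
          hdt, hdp]
      by_cases hxy : t[(i + j).toNat] = p[j.toNat]
      · have hne : ¬(t[(i + j).toNat] ≠ p[j.toNat]) := by simpa using hxy
        rw [if_neg hne]
        have hrng : (j + (kk + 1 : Nat) : Int) = (j + 1) + kk := by push_cast; ring
        rw [hrng]
        have ihh := ih t p i (j + 1) hi (by omega) (by push_cast at ht; omega)
          (by push_cast at hp; omega)
        have h1 : (i + (j + 1)).toNat = (i + j).toNat + 1 := by omega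
        have h2 : (j + 1).toNat = j.toNat + 1 := by omega
        rw [h1, h2] at ihh
        rw [ihh, List.zip_cons_cons]
        simp only [pvLcp]
        rw [if_neg hne]
        have := pvLcp_nonneg ((t.drop ((i + j).toNat + 1)).zip (p.drop (j.toNat + 1)))
        push_cast
        omega
      · have hne : t[(i + j).toNat] ≠ p[j.toNat] := hxy
        rw [if_pos hne, List.zip_cons_cons]
        simp only [pvLcp]
        rw [if_pos hne]
        push_cast
        omega

-- ===== VERDICT (by name: the statement is the Claim_ definition above) =====
theorem naive_exact_matching_spec : Claim_equal_naive_exact_matching := by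
  intro text pattern _
  unfold Spec_naive_exact_matching naive_exact_matching naive_exact_matching_alt
  dsimp only
  set t := text.toList with htdef
  set p := pattern.toList with hpdef
  set n : Int := (t.length : Int) with hndef
  set m : Int := (p.length : Int) with hmdef
  -- both sides iterate over the same index list
  have hrange : PySem.List.pyRange 0 (n - m + 1) 1 = PySem.List.pyRange 0 (max (n - m + 1) 0) 1 := by
    by_cases h : n - m + 1 ≤ 0
    · rw [PySem.List.pyRange_one_eq_nil h, PySem.List.pyRange_one_eq_nil (by omega)]
    · rw [max_eq_left (by omega)]
  rw [hrange, pv_foldA]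
  have hcongr : (PySem.List.pyRange 0 (max (n - m + 1) 0) 1).map
        (fun i => pvAInner t p i (PySem.List.pyRange 0 m 1))
      = (PySem.List.pyRange 0 (max (n - m + 1) 0) 1).map
        (fun i => min (pvLcp ((PySem.List.slice t (some i) (some (i + m))).zip p) + 1) m) := by
    apply List.map_congr_left
    intro i hi
    rw [PySem.List.mem_pyRange_one] at hi
    have hi0 : 0 ≤ i := hi.1
    have him : i + m ≤ n := by omega
    have hslice : PySem.List.slice t (some i) (some (i + m))
        = List.take m.toNat (List.drop i.toNat t) := by
      rw [PySem.List.slice_toNat t hi0 (by omega)]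
      congr 1
      omega
    have hzip : (List.take m.toNat (List.drop i.toNat t)).zip p = (List.drop i.toNat t).zip p := by
      apply pv_zip_take_left
      omega
    have hinner := pv_inner_eq m.toNat t p i 0 hi0 le_rfl (by omega) (by omega)
    rw [show ((0 : Int) + (m.toNat : Nat)) = m by omega,
        show ((m.toNat : Nat) : Int) = m by omega] at hinner
    simp only [add_zero, Int.toNat_zero, List.drop_zero] at hinner
    rw [hinner, hslice, hzip]
  rw [hcongr]
  have hlen : (((PySem.List.pyRange 0 (max (n - m + 1) 0) 1).length : Nat) : Int)
      = max (n - m + 1) 0 := by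
    rw [PySem.List.length_pyRange_one]
    omega
  rw [zero_add, hlen, zero_add]
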